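-- pv_equiv track=rewrite | github.com/ldemon2333/lanqiaopython | day11/【学长带练】火星旅行.py | min_delt
-- ===== SOURCE A (Python) =====
-- class MonotonicQueue:
--     from collections import deque
--
--     def __init__(self, type, sub=[]):
--         self.type = type == 'decrease'
--
--         self.queue = self.deque()
--
--         for i in sub:
--             self.push(i)
--
--     def head(self):
--         return self.queue[0]
--
--     def is_monotonic(self, x):
--         tail = self.queue[-1]
--
--         return tail >= x if self.type else tail <= x
--
--     def push(self, x):
--         while self.queue and not self.is_monotonic(x):
--             self.queue.pop()
--
--         self.queue.append(x)
--
--     def pop(self, value):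
--         if self.head() == value:
--             self.queue.popleft()
--
-- def min_delt(P, D):
--     delts = []
--
--     n = len(P)
--     P_double, D_double = P * 2, D * 2
--
--     for i in range(1, n * 2):
--         P_double[i] += P_double[i - 1]
--         D_double[i] += D_double[i - 1]
--
--     fuel = [p - d for p, d in zip(P_double, D_double)]
--
--     min_queue = MonotonicQueue('increase', fuel[: n])
--     delts.append(min_queue.head())
--
--     for old_left in range(n - 1):
--         new_right = old_left + n
--
--         min_queue.pop(fuel[old_left])
--         min_queue.push(fuel[new_right])
--
--         delts.append(min_queue.head() - fuel[old_left])
--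
--     return delts
-- ===== SOURCE B (Python) =====
-- def min_delt(P, D):
--     n = len(P)
--     fuel = []
--     sp = sd = 0
--     for p, d in zip(P * 2, D * 2):
--         sp += p
--         sd += d
--         fuel.append(sp - sd)
--     out = [min(fuel[:n])]
--     for k in range(1, n):
--         out.append(min(fuel[k:k + n]) - fuel[k - 1])
--     return out
-- ===== Notes on version B (the rewrite author's own statement) =====
-- stated objective: simpler
-- what changed: Replaces the hand-rolled monotonic deque (push/pop with value-matched eviction) by a direct min() scan over each circular window of the doubled prefix-difference array, and builds the fuel array in one pass carrying both running sums instead of two in-place prefix loops plus a zip.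
import Mathlib
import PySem

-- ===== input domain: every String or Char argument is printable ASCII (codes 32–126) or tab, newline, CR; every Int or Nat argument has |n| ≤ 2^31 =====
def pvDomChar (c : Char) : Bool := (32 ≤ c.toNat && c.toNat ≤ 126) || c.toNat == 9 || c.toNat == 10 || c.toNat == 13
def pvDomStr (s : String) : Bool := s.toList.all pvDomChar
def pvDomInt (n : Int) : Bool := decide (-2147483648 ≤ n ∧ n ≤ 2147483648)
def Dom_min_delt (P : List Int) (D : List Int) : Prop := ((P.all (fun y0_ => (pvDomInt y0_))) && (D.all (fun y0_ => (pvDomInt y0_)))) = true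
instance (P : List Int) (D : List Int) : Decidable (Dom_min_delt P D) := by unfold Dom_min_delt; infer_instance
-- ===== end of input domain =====

-- B replaces the monotonic queue by a direct min-scan over each circular window; objective: simpler (not faster).

-- ===== PORT A =====
-- the in-place prefix-sum loop (X[i] += X[i-1]) ported as a recursion carrying the running total;
-- exact on every index the function later reads
def prefixAcc : List Int → Int → List Int
  | [], _ => []
  | x :: xs, acc => (acc + x) :: prefixAcc xs (acc + x)

-- MonotonicQueue('increase').push: pop from the tail while tail > x, then append x
def mqPush (q : List Int) (x : Int) : List Int :=
  if h : q = [] then [x]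
  else if q.getLast h ≤ x then q ++ [x]
  else mqPush q.dropLast x
termination_by q.length
decreasing_by
  have : 0 < q.length := List.length_pos_of_ne_nil h
  simp [List.length_dropLast]; omega

-- MonotonicQueue.pop: popleft iff the head equals the leaving value
def mqPop (q : List Int) (v : Int) : List Int :=
  match q with
  | [] => []
  | h :: t => if h = v then t else h :: t

-- the body of A's main loop (delts accumulated in the second component)
def stepA (fuel : List Int) (n : Nat) (st : List Int × List Int) (ol : Nat) : List Int × List Int :=
  let q1 := mqPop st.1 (fuel.getD ol 0)
  let q2 := mqPush q1 (fuel.getD (ol + n) 0)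
  (q2, st.2 ++ [q2.head?.getD 0 - fuel.getD ol 0])

def min_delt (P : List Int) (D : List Int) : List Int :=
  let n := P.length
  let Pd := prefixAcc (P ++ P) 0
  let Dd := prefixAcc (D ++ D) 0
  let fuel := (Pd.zip Dd).map (fun pd => pd.1 - pd.2)
  let q0 := (fuel.take n).foldl mqPush []
  ((List.range (n - 1)).foldl (stepA fuel n) (q0, [q0.head?.getD 0])).2

-- ===== PORT B =====
-- single pass over zip(P*2, D*2) carrying both running sums
def fuelB : List (Int × Int) → Int → Int → List Int
  | [], _, _ => []
  | pd :: rest, sp, sd => (sp + pd.1 - (sd + pd.2)) :: fuelB rest (sp + pd.1) (sd + pd.2)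

-- Python's min() on a list of ints (defaulted; only applied to nonempty windows under Pre_)
def pymin (l : List Int) : Int := (PySem.List.min? l (fun y => y)).getD 0

def min_delt_alt (P : List Int) (D : List Int) : List Int :=
  let n := P.length
  let fuel := fuelB ((P ++ P).zip (D ++ D)) 0 0
  (List.range' 1 (n - 1)).foldl (fun (out : List Int) (k : Nat) =>
      out ++ [pymin (PySem.List.slice fuel (some (k : Int)) (some ((k : Int) + (n : Int)))) - fuel.getD (k - 1) 0])
    [pymin (PySem.List.slice fuel none (some (n : Int)))]

-- ===== PRECONDITION & SPEC =====
-- Pre_ excludes exactly the inputs on which A raises IndexError: empty P (head of an empty queue)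
-- and D shorter than P (the prefix loop / window indexing run past D*2).
def Pre_min_delt (P : List Int) (D : List Int) : Prop := P ≠ [] ∧ P.length ≤ D.length
instance (P : List Int) (D : List Int) : Decidable (Pre_min_delt P D) := by unfold Pre_min_delt; infer_instance

def pvWitness_min_delt : List Int × List Int := ([3, 1, 2], [2, 2, 2])

def Spec_min_delt (P : List Int) (D : List Int) (out : List Int) : Prop := out = min_delt_alt P D
instance (P : List Int) (D : List Int) (out : List Int) : Decidable (Spec_min_delt P D out) := by unfold Spec_min_delt; infer_instance

-- ===== CLAIM (what is proved, stated in full; the proofs are below) =====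
def Claim_equal_min_delt : Prop := ∀ (P : List Int) (D : List Int), Dom_min_delt P D → Pre_min_delt P D → Spec_min_delt P D (min_delt P D)

-- ===== LEMMAS AND PROOFS =====

-- the monotone queue's contents: the elements of w that are ≤ every later element
def survivors : List Int → List Int
  | [] => []
  | x :: xs => if xs.all (x ≤ ·) then x :: survivors xs else survivors xs

theorem survivors_subset {w : List Int} {y : Int} (h : y ∈ survivors w) : y ∈ w := by
  induction w with
  | nil => simpa [survivors] using h
  | cons x xs ih =>
    rw [survivors] at h
    by_cases hall : xs.all (x ≤ ·)
    · rw [if_pos hall] at h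
      rcases List.mem_cons.mp h with h | h
      · simp [h]
      · exact List.mem_cons_of_mem _ (ih h)
    · rw [if_neg hall] at h
      exact List.mem_cons_of_mem _ (ih h)

theorem survivors_sorted (w : List Int) : (survivors w).Pairwise (· ≤ ·) := by
  induction w with
  | nil => simp [survivors]
  | cons x xs ih =>
    rw [survivors]
    by_cases hall : xs.all (x ≤ ·)
    · rw [if_pos hall]
      refine List.Pairwise.cons ?_ ih
      intro y hy
      have := List.all_eq_true.mp hall y (survivors_subset hy)
      simpa using this
    · rw [if_neg hall]; exact ih

theorem survivors_ne_nil (x : Int) (xs : List Int) : survivors (x :: xs) ≠ [] := by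
  induction xs generalizing x with
  | nil => simp [survivors]
  | cons y ys ih =>
    rw [survivors]
    by_cases hall : ((y :: ys).all (x ≤ ·))
    · rw [if_pos hall]; simp
    · rw [if_neg hall]; exact ih y

theorem takeWhile_dropLast_of_last_false (p : Int → Bool) :
    ∀ (l : List Int) (h : l ≠ []), p (l.getLast h) = false → l.takeWhile p = l.dropLast.takeWhile p := by
  intro l
  induction l with
  | nil => intro h; exact absurd rfl h
  | cons x xs ih =>
    intro h hp
    cases xs with
    | nil =>
      simp only [List.getLast_singleton] at hp
      simp [List.takeWhile, hp]
    | cons y ys =>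
      have hne : (y :: ys) ≠ [] := by simp
      have hlast : (x :: y :: ys).getLast h = (y :: ys).getLast hne := by
        simp [List.getLast_cons]
      rw [hlast] at hp
      show (x :: y :: ys).takeWhile p = (x :: (y :: ys).dropLast).takeWhile p
      cases hpx : p x
      · simp [List.takeWhile_cons, hpx]
      · simp [List.takeWhile_cons, hpx, ih hne hp]

theorem takeWhile_eq_self_of_all (p : Int → Bool) (l : List Int) (h : ∀ y ∈ l, p y = true) :
    l.takeWhile p = l := by
  induction l with
  | nil => rfl
  | cons x xs ih =>
    rw [List.takeWhile_cons, h x (by simp), ih (fun y hy => h y (List.mem_cons_of_mem _ hy))]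
    rfl

theorem mqPush_sorted (q : List Int) (b : Int) (hs : q.Pairwise (· ≤ ·)) :
    mqPush q b = q.takeWhile (· ≤ b) ++ [b] := by
  induction q using List.reverseRecOn with
  | nil => rw [mqPush]; simp
  | append_singleton l a ih =>
    rw [mqPush, dif_neg (by simp)]
    have hlast : (l ++ [a]).getLast (by simp) = a := by
      simp [List.getLast_append]
    rw [hlast]
    by_cases hab : a ≤ b
    · rw [if_pos hab]
      have hall : ∀ y ∈ l ++ [a], (fun z => decide (z ≤ b)) y = true := by
        intro y hy
        rcases List.mem_append.mp hy with h | h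
        · have := (List.pairwise_append.mp hs).2.2 y h a (by simp)
          simp [le_trans this hab]
        · simp at h; simp [h, hab]
      rw [takeWhile_eq_self_of_all _ _ hall]
    · rw [if_neg hab]
      have hl : l.Pairwise (· ≤ ·) := hs.sublist (by simp)
      have hdrop : (l ++ [a]).dropLast = l := by simp
      rw [hdrop, ih hl]
      have := takeWhile_dropLast_of_last_false (fun z => decide (z ≤ b)) (l ++ [a]) (by simp)
        (by rw [hlast]; simp [hab])
      rw [show ((l ++ [a]).takeWhile fun z => decide (z ≤ b)) = (l ++ [a]).dropLast.takeWhile (fun z => decide (z ≤ b)) from this, hdrop]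

theorem survivors_append_singleton (w : List Int) (b : Int) :
    survivors (w ++ [b]) = (survivors w).takeWhile (· ≤ b) ++ [b] := by
  induction w with
  | nil => simp [survivors]
  | cons x w ih =>
    show survivors (x :: (w ++ [b])) = (survivors (x :: w)).takeWhile (· ≤ b) ++ [b]
    rw [survivors, survivors]
    by_cases hall : w.all (x ≤ ·)
    · rw [if_pos hall]
      by_cases hxb : x ≤ b
      · have : (w ++ [b]).all (x ≤ ·) = true := by
          rw [List.all_append]
          simp only [Bool.and_eq_true]
          exact ⟨hall, by simp [hxb]⟩
        rw [if_pos this, ih, List.takeWhile_cons]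
        simp [hxb]
      · have : ¬ ((w ++ [b]).all (x ≤ ·) = true) := by
          rw [List.all_append]; simp [hxb]
        rw [if_neg this, ih, List.takeWhile_cons]
        have hnil : (survivors w).takeWhile (fun z => decide (x ≤ b)) = [] := by simp [hxb]
        have : (survivors w).takeWhile (· ≤ b) = [] := by
          cases hw : survivors w with
          | nil => rfl
          | cons h t =>
            have hmem : h ∈ w := survivors_subset (by rw [hw]; simp)
            have hxh : x ≤ h := by simpa using List.all_eq_true.mp hall h hmem
            have : ¬ h ≤ b := fun hc => hxb (le_trans hxh hc)
            simp [List.takeWhile_cons, this]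
        rw [this]
        simp [hxb]
    · rw [if_neg hall]
      have : ¬ ((w ++ [b]).all (x ≤ ·) = true) := by
        rw [List.all_append]
        simp only [Bool.and_eq_true]
        intro hc
        exact hall hc.1
      rw [if_neg this, ih]

theorem mqPush_survivors (w : List Int) (b : Int) :
    mqPush (survivors w) b = survivors (w ++ [b]) := by
  rw [mqPush_sorted _ _ (survivors_sorted w), survivors_append_singleton]

theorem foldl_mqPush_survivors (l : List Int) : ∀ (w : List Int),
    l.foldl mqPush (survivors w) = survivors (w ++ l) := by
  induction l with
  | nil => simp
  | cons b l ih =>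
    intro w
    have : List.foldl mqPush (survivors w) (b :: l) = List.foldl mqPush (mqPush (survivors w) b) l := rfl
    rw [this, mqPush_survivors, ih (w ++ [b])]
    simp

theorem foldl_min_min : ∀ (l : List Int) (a b : Int), l.foldl min (min a b) = min a (l.foldl min b) := by
  intro l
  induction l with
  | nil => intro a b; rfl
  | cons c l ih =>
    intro a b
    show l.foldl min (min (min a b) c) = min a ((c :: l).foldl min b)
    rw [min_assoc, ih]
    rfl

theorem foldl_min_le_init : ∀ (l : List Int) (x : Int), l.foldl min x ≤ x := by
  intro l
  induction l with
  | nil => intro x; simp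
  | cons c l ih => intro x; exact le_trans (ih (min x c)) (min_le_left _ _)

theorem foldl_min_le_mem : ∀ (l : List Int) (x y : Int), y ∈ l → l.foldl min x ≤ y := by
  intro l
  induction l with
  | nil => intro x y hy; simp at hy
  | cons z l ih =>
    intro x y hy
    rcases List.mem_cons.mp hy with h | h
    · subst h
      calc l.foldl min (min x y) ≤ min x y := by
            clear ih hy
            induction l generalizing x y with
            | nil => simp
            | cons c l ih2 => exact le_trans (ih2 (min x y) c) (by simp [min_le_left])
        _ ≤ y := min_le_right _ _
    · exact ih (min x z) y h

theorem foldl_min_of_le (l : List Int) (x : Int) (h : ∀ y ∈ l, x ≤ y) : l.foldl min x = x := by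
  induction l generalizing x with
  | nil => rfl
  | cons y ys ih =>
    have hxy : min x y = x := min_eq_left (h y (by simp))
    show ys.foldl min (min x y) = x
    rw [hxy]
    exact ih x (fun z hz => h z (List.mem_cons_of_mem _ hz))

theorem survivors_head : ∀ (xs : List Int) (x : Int),
    (survivors (x :: xs)).head?.getD 0 = xs.foldl min x := by
  intro xs
  induction xs with
  | nil => intro x; simp [survivors]
  | cons y ys ih =>
    intro x
    rw [survivors]
    by_cases hall : ((y :: ys).all (x ≤ ·))
    · rw [if_pos hall]
      have hle : ∀ z ∈ y :: ys, x ≤ z := by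
        intro z hz; simpa using List.all_eq_true.mp hall z hz
      rw [foldl_min_of_le _ _ hle]
      rfl
    · rw [if_neg hall, ih y]
      obtain ⟨z, hz, hzx⟩ : ∃ z ∈ y :: ys, ¬ x ≤ z := by
        by_contra hc
        push_neg at hc
        exact hall (List.all_eq_true.mpr (fun u hu => by simpa using hc u hu))
      have h1 : List.foldl min x (y :: ys) = ys.foldl min (min x y) := rfl
      have hm : ys.foldl min y ≤ z := by
        rcases List.mem_cons.mp hz with h | h
        · exact h ▸ foldl_min_le_init ys y
        · exact foldl_min_le_mem _ _ _ h
      have h2 : min x (ys.foldl min y) = ys.foldl min y :=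
        min_eq_right (le_trans hm (le_of_lt (not_le.mp hzx)))
      rw [h1, foldl_min_min, h2]

theorem survivors_head_pymin (w : List Int) (hw : w ≠ []) :
    (survivors w).head?.getD 0 = pymin w := by
  cases w with
  | nil => exact absurd rfl hw
  | cons x xs =>
    rw [survivors_head, pymin, PySem.List.min?_id_cons]
    rfl

theorem mqPop_survivors (a : Int) (rest : List Int) :
    mqPop (survivors (a :: rest)) a = survivors rest := by
  rw [survivors]
  by_cases hall : rest.all (a ≤ ·)
  · rw [if_pos hall]; simp [mqPop]
  · rw [if_neg hall]
    obtain ⟨z, hz, hza⟩ : ∃ z ∈ rest, ¬ a ≤ z := by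
      by_contra hc
      push_neg at hc
      exact hall (List.all_eq_true.mpr (fun u hu => by simpa using hc u hu))
    cases rest with
    | nil => simp at hz
    | cons r0 rs =>
      have hhead := survivors_head rs r0
      have hm : rs.foldl min r0 ≤ z := by
        rcases List.mem_cons.mp hz with h | h
        · exact h ▸ foldl_min_le_init rs r0
        · exact foldl_min_le_mem _ _ _ h
      cases hsv : survivors (r0 :: rs) with
      | nil => exact absurd hsv (survivors_ne_nil r0 rs)
      | cons h t =>
        have hh : h = rs.foldl min r0 := by
          rw [hsv] at hhead; simpa using hhead
        have hha : ¬ h = a := by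
          have hza' : z < a := not_le.mp hza
          omega
        simp [mqPop, hha]

-- window decomposition facts
theorem win_cons (fuel : List Int) (n s : Nat) (hn : 1 ≤ n) (hs : s < fuel.length) :
    (fuel.drop s).take n = fuel.getD s 0 :: (fuel.drop (s + 1)).take (n - 1) := by
  obtain ⟨m, rfl⟩ : ∃ m, n = m + 1 := ⟨n - 1, by omega⟩
  rw [List.drop_eq_getElem_cons hs, List.take_succ_cons, List.getD_eq_getElem fuel 0 hs]
  simp

theorem win_snoc (fuel : List Int) (n s : Nat) (hn : 1 ≤ n) (hs : s + n < fuel.length) :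
    (fuel.drop (s + 1)).take (n - 1) ++ [fuel.getD (s + n) 0] = (fuel.drop (s + 1)).take n := by
  obtain ⟨m, rfl⟩ : ∃ m, n = m + 1 := ⟨n - 1, by omega⟩
  rw [List.take_succ]
  have h1 : (fuel.drop (s + 1))[m]? = some fuel[s + (m + 1)] := by
    rw [List.getElem?_drop, show s + 1 + m = s + (m + 1) from by omega]
    exact List.getElem?_eq_getElem (by omega)
  have h2 : fuel.getD (s + (m + 1)) 0 = fuel[s + (m + 1)] := List.getD_eq_getElem fuel 0 (by omega)
  rw [h1, h2]
  simp

theorem loopA (fuel : List Int) (n : Nat) (hn : 1 ≤ n) (hlen : fuel.length = 2 * n) :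
    ∀ (m s : Nat) (acc : List Int), s + m ≤ n - 1 →
    (List.range' s m).foldl (stepA fuel n) (survivors ((fuel.drop s).take n), acc)
    = (survivors ((fuel.drop (s + m)).take n),
       acc ++ (List.range' s m).map (fun ol =>
         (survivors ((fuel.drop (ol + 1)).take n)).head?.getD 0 - fuel.getD ol 0)) := by
  intro m
  induction m with
  | zero => intro s acc _; simp
  | succ m ih =>
    intro s acc hsm
    have hs : s < fuel.length := by omega
    have hsn : s + n < fuel.length := by omega
    rw [List.range'_succ, List.foldl_cons]
    have hstep : stepA fuel n (survivors ((fuel.drop s).take n), acc) s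
        = (survivors ((fuel.drop (s + 1)).take n),
           acc ++ [(survivors ((fuel.drop (s + 1)).take n)).head?.getD 0 - fuel.getD s 0]) := by
      simp only [stepA]
      rw [win_cons fuel n s hn hs, mqPop_survivors, mqPush_survivors, win_snoc fuel n s hn hsn]
    rw [hstep, ih (s + 1) _ (by omega)]
    rw [show s + 1 + m = s + (m + 1) from by omega, List.map_cons, List.append_assoc]
    rfl

theorem fuelB_zip : ∀ (l₁ l₂ : List Int) (sp sd : Int),
    fuelB (l₁.zip l₂) sp sd
    = ((prefixAcc l₁ sp).zip (prefixAcc l₂ sd)).map (fun pd => pd.1 - pd.2) := by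
  intro l₁
  induction l₁ with
  | nil => intro l₂ sp sd; rfl
  | cons a l₁ ih =>
    intro l₂ sp sd
    cases l₂ with
    | nil => rfl
    | cons b l₂ => simp [fuelB, prefixAcc, ih]

theorem prefixAcc_length (l : List Int) : ∀ acc, (prefixAcc l acc).length = l.length := by
  induction l with
  | nil => intro acc; rfl
  | cons x xs ih => intro acc; simp [prefixAcc, ih]

theorem map_shift (F : Nat → Int) (G : Nat → Int) :
    ∀ (m s : Nat), (List.range' s m).map (fun ol => F (ol + 1) - G ol)
      = (List.range' (s + 1) m).map (fun k => F k - G (k - 1)) := by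
  intro m
  induction m with
  | zero => intro s; rfl
  | succ m ih =>
    intro s
    rw [List.range'_succ, List.range'_succ]
    simp only [List.map_cons]
    rw [ih (s + 1)]
    simp

-- ===== VERDICT (by name: the statement is the Claim_ definition above) =====
theorem min_delt_spec : Claim_equal_min_delt := by
  unfold Claim_equal_min_delt
  intro P D _ hpre
  obtain ⟨hPne, hPD⟩ := hpre
  unfold Spec_min_delt min_delt min_delt_alt
  simp only []
  have hn1 : 1 ≤ P.length := List.length_pos_of_ne_nil hPne
  set n := P.length with hn
  set fuel := (((prefixAcc (P ++ P) 0).zip (prefixAcc (D ++ D) 0)).map fun pd => pd.1 - pd.2) with hfuel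
  have hBf : fuelB ((P ++ P).zip (D ++ D)) 0 0 = fuel := fuelB_zip (P ++ P) (D ++ D) 0 0
  have hflen : fuel.length = 2 * n := by
    rw [hfuel]
    simp [prefixAcc_length, List.length_zip]
    omega
  rw [hBf]
  -- A side: initial queue is the survivors of the first window
  have hq0 : (fuel.take n).foldl mqPush [] = survivors (fuel.take n) := by
    have := foldl_mqPush_survivors (fuel.take n) []
    simpa [survivors] using this
  rw [hq0]
  have htake : fuel.take n = (fuel.drop 0).take n := by simp
  have hloop := loopA fuel n hn1 hflen (n - 1) 0
    [(survivors ((fuel.drop 0).take n)).head?.getD 0] (by omega)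
  rw [htake] at hq0 ⊢
  rw [List.range_eq_range', hloop]
  -- B side: unfold the append-singleton fold into a map
  rw [PySem.List.foldl_append_singleton_eq_map]
  -- identify the slices with windows
  rw [PySem.List.slice_to_natCast]
  have hwin_ne : ∀ j : Nat, j ≤ n - 1 → (fuel.drop j).take n ≠ [] := by
    intro j hj
    have : ((fuel.drop j).take n).length = min n (fuel.length - j) := by simp
    intro hc
    rw [hc] at this
    simp at this
    omega
  -- first entries agree
  have hfirst : (survivors ((fuel.drop 0).take n)).head?.getD 0 = pymin (fuel.take n) := by
    rw [← htake]
    exact survivors_head_pymin _ (by simpa [htake] using hwin_ne 0 (by omega))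
  -- rewrite the heads in the mapped loop outputs
  have hmapA : (List.range' 0 (n - 1)).map (fun ol =>
        (survivors ((fuel.drop (ol + 1)).take n)).head?.getD 0 - fuel.getD ol 0)
      = (List.range' 0 (n - 1)).map (fun ol => pymin ((fuel.drop (ol + 1)).take n) - fuel.getD ol 0) := by
    apply List.map_congr_left
    intro ol hol
    have : ol < n - 1 := by
      have := List.mem_range'_1.mp hol
      omega
    rw [survivors_head_pymin _ (hwin_ne (ol + 1) (by omega))]
  have hmapB : ∀ k : Nat, pymin (PySem.List.slice fuel (some (k : Int)) (some ((k : Int) + (n : Int))))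
      = pymin ((fuel.drop k).take n) := by
    intro k
    rw [PySem.List.slice_natCast_add]
  simp only [hmapA, hmapB]
  rw [hfirst]
  show [pymin (fuel.take n)] ++ _ = [pymin (fuel.take n)] ++ _
  congr 1
  have := map_shift (fun k => pymin ((fuel.drop k).take n)) (fun ol => fuel.getD ol 0) (n - 1) 0
  simpa using this
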